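-- pv_equiv track=rewrite | github.com/jano31415/codejam | kickstart/k2021_g/proba.py | solve
-- ===== SOURCE A (Python) =====
-- def solve(N,D,C,M,s):
--     for i,si in enumerate(s):
--
--         if si == "C":
--             if C == 0:
--                 for j in range(i,len(s)):
--                     if s[j] == "D":
--                         return "NO"
--                 return "YES"
--             C-=1
--         elif si == "D":
--             if D==0:
--                 return "NO"
--             D-=1
--             C+=M
--
--     return "YES"
-- ===== SOURCE B (Python) =====
-- def solve(N, D, C, M, s):
--     # Closed-form characterization: just before position i the simulation's
--     # C-budget equals C + M*d - c and its D-budget equals D - d, where d and c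
--     # are the numbers of 'D'/'C' in s[:i] (affine in the prefix counts, since
--     # every earlier 'C' decremented and every earlier 'D' added M).  So:
--     # stage 1 materializes the budget table; stage 2 is a stateless scan that
--     # classifies the first budget violation (a 'C' violation is "NO" exactly
--     # when some 'D' remains, i.e. d < total number of 'D').
--     budgets = []
--     d = c = 0
--     for ch in s:
--         budgets.append((ch, C + M * d - c, d))
--         d += (ch == 'D')
--         c += (ch == 'C')
--     total_d = d
--     for ch, cb, dseen in budgets:
--         if ch == 'C' and cb == 0:
--             return "NO" if dseen < total_d else "YES"
--         if ch == 'D' and dseen == D: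
--             return "NO"
--     return "YES"
-- ===== Notes on version B (the rewrite author's own statement) =====
-- stated objective: alternative
-- what changed: B replaces A's stateful simulation by a closed-form characterization: a first pass materializes the affine budgets (C + M*d - c, d) for every position from prefix counts, and a second, stateless pass classifies the first budget violation, with A's nested suffix scan becoming a comparison of d against the total 'D' count.
import Mathlib
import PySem

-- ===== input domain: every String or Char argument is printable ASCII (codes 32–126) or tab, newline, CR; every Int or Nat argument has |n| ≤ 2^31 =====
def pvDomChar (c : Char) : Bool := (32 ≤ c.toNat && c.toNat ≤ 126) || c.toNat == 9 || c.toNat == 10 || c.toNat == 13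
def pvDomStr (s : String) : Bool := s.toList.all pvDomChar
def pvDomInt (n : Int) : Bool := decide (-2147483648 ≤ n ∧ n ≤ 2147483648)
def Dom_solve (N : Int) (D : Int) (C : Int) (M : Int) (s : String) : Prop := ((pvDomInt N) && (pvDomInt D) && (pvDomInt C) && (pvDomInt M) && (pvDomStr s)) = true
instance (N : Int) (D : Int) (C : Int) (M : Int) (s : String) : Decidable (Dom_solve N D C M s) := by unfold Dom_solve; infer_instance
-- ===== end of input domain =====

-- B replaces the stateful simulation by closed-form affine budgets over prefix
-- counts, materialized in one pass and classified by a second stateless pass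
-- (alternative decomposition; same asymptotic cost on typical inputs).

-- ===== PORT A =====
-- inner loop: 'for j in range(i, len(s)): if s[j] == "D": return "NO"; return "YES"'
def solveA_scan : List Char → String
  | [] => "YES"
  | c :: rest => if c == 'D' then "NO" else solveA_scan rest

def solveA_loop (D C M : Int) : List Char → String
  | [] => "YES"
  | si :: rest =>
    if si == 'C' then
      if C == 0 then solveA_scan (si :: rest)
      else solveA_loop D (C - 1) M rest
    else if si == 'D' then
      if D == 0 then "NO" else solveA_loop (D - 1) (C + M) M rest
    else solveA_loop D C M rest

def solve (N : Int) (D : Int) (C : Int) (M : Int) (s : String) : String :=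
  solveA_loop D C M s.toList

-- ===== PORT B =====
-- stage 1: 'budgets.append((ch, C + M*d - c, d)); d += (ch=='D'); c += (ch=='C')';
-- returns the table and the final d (= total_d)
def solveB_budgets (C M : Int) : List Char → Int → Int → (List (Char × Int × Int) × Int)
  | [], d, _ => ([], d)
  | ch :: rest, d, c =>
    let entry : Char × Int × Int := (ch, C + M * d - c, d)
    let r := solveB_budgets C M rest (d + (if ch == 'D' then 1 else 0)) (c + (if ch == 'C' then 1 else 0))
    (entry :: r.1, r.2)

-- stage 2: stateless classification of the first budget violation
def solveB_classify (D totalD : Int) : List (Char × Int × Int) → String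
  | [] => "YES"
  | (ch, cb, dseen) :: rest =>
    if ch == 'C' && cb == 0 then (if dseen < totalD then "NO" else "YES")
    else if ch == 'D' && dseen == D then "NO"
    else solveB_classify D totalD rest

def solve_alt (N : Int) (D : Int) (C : Int) (M : Int) (s : String) : String :=
  let r := solveB_budgets C M s.toList 0 0
  solveB_classify D r.2 r.1

-- ===== PRECONDITION & SPEC =====
def Spec_solve (N : Int) (D : Int) (C : Int) (M : Int) (s : String) (out : String) : Prop := out = solve_alt N D C M s
instance (N : Int) (D : Int) (C : Int) (M : Int) (s : String) (out : String) : Decidable (Spec_solve N D C M s out) := by unfold Spec_solve; infer_instance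

-- ===== CLAIM (what is proved, stated in full; the proofs are below) =====
def Claim_equal_solve : Prop := ∀ (N : Int) (D : Int) (C : Int) (M : Int) (s : String), Dom_solve N D C M s → Spec_solve N D C M s (solve N D C M s)

-- ===== LEMMAS AND PROOFS =====

def countD : List Char → Int
  | [] => 0
  | c :: rest => (if c == 'D' then 1 else 0) + countD rest

theorem countD_nonneg (l : List Char) : 0 ≤ countD l := by
  induction l with
  | nil => simp [countD]
  | cons c rest ih => simp only [countD]; split <;> omega

theorem budgets_snd (C M : Int) (l : List Char) (d c : Int) :
    (solveB_budgets C M l d c).2 = d + countD l := by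
  induction l generalizing d c with
  | nil => simp [solveB_budgets, countD]
  | cons ch rest ih =>
    simp only [solveB_budgets, countD, ih]
    split <;> omega

theorem scan_eq_compare (l : List Char) (dseen : Int) :
    solveA_scan l = (if dseen < dseen + countD l then "NO" else "YES") := by
  induction l generalizing dseen with
  | nil => simp [solveA_scan, countD]
  | cons c rest ih =>
    simp only [solveA_scan, countD]
    by_cases h : c = 'D'
    · have := countD_nonneg rest
      simp [h]; omega
    · rw [ih dseen]
      have : (c == 'D') = false := by simpa using h
      simp [this]

theorem loop_eq (l : List Char) (D0 C0 M D' C' d c totalD : Int)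
    (hC : C' = C0 + M * d - c) (hD : D' = D0 - d)
    (hT : totalD = d + countD l) :
    solveA_loop D' C' M l = solveB_classify D0 totalD (solveB_budgets C0 M l d c).1 := by
  induction l generalizing D' C' d c with
  | nil => simp [solveA_loop, solveB_budgets, solveB_classify]
  | cons ch rest ih =>
    simp only [solveA_loop, solveB_budgets, solveB_classify]
    by_cases hc : ch = 'C'
    · subst hc
      have hT' : totalD = d + countD rest := by simpa [countD] using hT
      by_cases h0 : C' = 0
      · have e1 : (C' == 0) = true := by simpa using h0
        have e2 : (C0 + M * d - c == 0) = true := by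
          simp only [beq_iff_eq]; omega
        simp only [show (('C' : Char) == 'C') = true by decide, e1, e2,
          Bool.and_self, if_true]
        rw [solveA_scan]
        simp only [show (('C' : Char) == 'D') = false by decide,
          Bool.false_eq_true, if_false]
        rw [scan_eq_compare rest d, hT']
      · have e1 : (C' == 0) = false := by simpa using h0
        have e2 : (C0 + M * d - c == 0) = false := by
          simp only [beq_eq_false_iff_ne, ne_eq]; omega
        simp only [show (('C' : Char) == 'C') = true by decide, e1, e2,
          Bool.false_eq_true, if_false, Bool.false_and,
          show ((('C':Char) == 'D' : Bool) = false) from by decide, add_zero]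
        exact ih D' (C' - 1) d (c + 1) (by omega) hD (by simpa using hT')
    · have hc' : (ch == 'C') = false := by simpa using hc
      simp only [hc', Bool.false_eq_true, if_false, Bool.false_and]
      by_cases hd : ch = 'D'
      · have hd' : (ch == 'D') = true := by simpa using hd
        have hT' : totalD = (d + 1) + countD rest := by
          rw [hT]; simp [countD, hd]; ring
        simp only [hd', Bool.true_and, if_true]
        by_cases hD0 : D' = 0
        · have e1 : (D' == 0) = true := by simpa using hD0
          have e2 : (d == D0) = true := by simp only [beq_iff_eq]; omega
          simp [e1, e2]
        · have e1 : (D' == 0) = false := by simpa using hD0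
          have e2 : (d == D0) = false := by
            simp only [beq_eq_false_iff_ne, ne_eq]; omega
          simp only [e1, e2, Bool.false_eq_true, if_false, add_zero]
          exact ih (D' - 1) (C' + M) (d + 1) c (by rw [hC]; ring) (by omega)
            (by simpa [hd] using hT')
      · have hd' : (ch == 'D') = false := by simpa using hd
        simp only [hd', Bool.false_eq_true, if_false, Bool.false_and, add_zero]
        exact ih D' C' d c (by simpa [hd] using hC) hD (by simpa [countD, hd] using hT)

-- ===== VERDICT (by name: the statement is the Claim_ definition above) =====
theorem solve_spec : Claim_equal_solve := by
  intro N D C M s _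
  unfold Spec_solve solve solve_alt
  show solveA_loop D C M s.toList =
    solveB_classify D (solveB_budgets C M s.toList 0 0).2 (solveB_budgets C M s.toList 0 0).1
  rw [budgets_snd]
  exact loop_eq s.toList D C M D C 0 0 _ (by ring) (by ring) (by ring)
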